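-- pv_equiv track=rewrite | github.com/AnukaMithara/Competitive-Programming | IEEE Xtreme 17.0/Python/Labradoodle.py | find_blends
-- ===== SOURCE A (Python) =====
-- def find_blends(dictionary, words):
--     prefixes = {}
--     suffixes = {}
--     for word in dictionary:
--         for i in range(3, len(word) + 1):
--             prefix = word[:i]
--             suffix = word[i - 1:]
--             if prefix not in prefixes:
--                 prefixes[prefix] = []
--             if suffix not in suffixes:
--                 suffixes[suffix] = []
--             prefixes[prefix].append(word)
--             suffixes[suffix].append(word)
--
--     results = []
--     for word in words:
--         blends = set()
--         for i in range(3, len(word)):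
--             prefix = word[:i]
--             suffix = word[i - 1:]
--             if prefix in prefixes and suffix in suffixes:
--                 for pre_word in prefixes[prefix]:
--                     for suf_word in suffixes[suffix]:
--                         blends.add((pre_word, suf_word))
--         if len(blends) > 1:
--             results.append('ambiguous')
--         elif len(blends) == 0:
--             results.append('none')
--         else:
--             results.append(' '.join(list(blends)[0]))
--     return results
-- ===== SOURCE B (Python) =====
-- def find_blends(dictionary, words):
--     results = []
--     for word in words:
--         blends = set()
--         for i in range(3, len(word)):
--             prefix = word[:i]
--             suffix = word[i - 1:]
--             pre_words = [d for d in dictionary if d.startswith(prefix)]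
--             suf_words = [d for d in dictionary
--                          if len(d) >= len(suffix) + 2 and d.endswith(suffix)]
--             for p in pre_words:
--                 for s in suf_words:
--                     blends.add((p, s))
--         if not blends:
--             results.append('none')
--         elif len(blends) == 1:
--             results.append(' '.join(next(iter(blends))))
--         else:
--             results.append('ambiguous')
--     return results
-- ===== Notes on version B (the rewrite author's own statement) =====
-- stated objective: simpler
-- what changed: B deletes A's whole build-an-index phase (the prefix/suffix dicts registering every word[:i]/word[i-1:]) and instead, for each query split, filters the dictionary directly for words starting with the prefix and words ending with the suffix with len(d) >= len(suffix)+2 (the constraint A's i>=3 registration implies), collecting the same pair set.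
import Mathlib
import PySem

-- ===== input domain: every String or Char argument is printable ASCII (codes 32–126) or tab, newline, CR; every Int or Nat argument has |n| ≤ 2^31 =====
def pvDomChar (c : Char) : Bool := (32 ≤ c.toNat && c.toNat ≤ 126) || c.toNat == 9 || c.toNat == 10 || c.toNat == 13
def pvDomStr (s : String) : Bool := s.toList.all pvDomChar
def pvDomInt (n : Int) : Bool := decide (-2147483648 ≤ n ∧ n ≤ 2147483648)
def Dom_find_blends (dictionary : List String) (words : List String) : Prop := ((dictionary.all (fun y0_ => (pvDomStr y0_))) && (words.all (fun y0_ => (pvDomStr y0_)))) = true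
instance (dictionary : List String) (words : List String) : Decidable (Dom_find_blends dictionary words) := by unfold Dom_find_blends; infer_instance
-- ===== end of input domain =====

-- B drops A's prefix/suffix index and scans the dictionary on demand per query split (simpler: no
-- index build; same return value, proved equal on every input).

-- ===== PORT A =====
-- one iteration of A's registration loop: record word[:i] and word[i-1:] in the two dicts
def pvRegStep (word : String)
    (ps : PySem.Dict String (List String) × PySem.Dict String (List String)) (i : Int) :
    PySem.Dict String (List String) × PySem.Dict String (List String) :=
  let prefix_ := PySem.Str.slice word none (some i)
  let suffix_ := PySem.Str.slice word (some (i - 1)) none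
  let prefixes := if ps.1.contains prefix_ then ps.1 else ps.1.insert prefix_ []
  let suffixes := if ps.2.contains suffix_ then ps.2 else ps.2.insert suffix_ []
  (prefixes.modify prefix_ [] (fun l => l ++ [word]),
   suffixes.modify suffix_ [] (fun l => l ++ [word]))


def find_blends (dictionary : List String) (words : List String) : List String :=
  let ps := dictionary.foldl
    (fun ps word => (PySem.List.pyRange 3 (PySem.Str.len word + 1)).foldl (pvRegStep word) ps)
    (PySem.Dict.empty, PySem.Dict.empty)
  let prefixes := ps.1
  let suffixes := ps.2
  words.foldl (fun results word =>
    let blends : PySem.Set (String × String) :=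
      (PySem.List.pyRange 3 (PySem.Str.len word)).foldl (fun blends i =>
        let prefix_ := PySem.Str.slice word none (some i)
        let suffix_ := PySem.Str.slice word (some (i - 1)) none
        if prefixes.contains prefix_ && suffixes.contains suffix_ then
          (prefixes.getD prefix_ []).foldl (fun blends pre_word =>
            (suffixes.getD suffix_ []).foldl (fun blends suf_word =>
              PySem.Set.add blends (pre_word, suf_word)) blends) blends
        else blends) PySem.Set.empty
    if PySem.Set.len blends > 1 then results ++ ["ambiguous"]
    else if PySem.Set.len blends = 0 then results ++ ["none"]
    else results ++ [(PySem.List.pyGet? blends 0).elim "" (fun p => PySem.Str.join " " [p.1, p.2])]) []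

-- ===== PORT B =====
def find_blends_alt (dictionary : List String) (words : List String) : List String :=
  words.foldl (fun results word =>
    let blends : PySem.Set (String × String) :=
      (PySem.List.pyRange 3 (PySem.Str.len word)).foldl (fun blends i =>
        let prefix_ := PySem.Str.slice word none (some i)
        let suffix_ := PySem.Str.slice word (some (i - 1)) none
        let pre_words := dictionary.filter (fun d => PySem.Str.startswith d prefix_)
        let suf_words := dictionary.filter (fun d =>
          decide (PySem.Str.len suffix_ + 2 ≤ PySem.Str.len d) && PySem.Str.endswith d suffix_)
        pre_words.foldl (fun blends p =>
          suf_words.foldl (fun blends s => PySem.Set.add blends (p, s)) blends) blends)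
        PySem.Set.empty
    match blends with
    | [] => results ++ ["none"]
    | [p] => results ++ [PySem.Str.join " " [p.1, p.2]]
    | _ => results ++ ["ambiguous"]) []


-- ===== PRECONDITION & SPEC =====
def Spec_find_blends (dictionary : List String) (words : List String) (out : List String) : Prop := out = find_blends_alt dictionary words
instance (dictionary : List String) (words : List String) (out : List String) : Decidable (Spec_find_blends dictionary words out) := by unfold Spec_find_blends; infer_instance

-- ===== CLAIM (what is proved, stated in full; the proofs are below) =====
def Claim_equal_find_blends : Prop := ∀ (dictionary : List String) (words : List String), Dom_find_blends dictionary words → Spec_find_blends dictionary words (find_blends dictionary words)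

-- ===== LEMMAS AND PROOFS =====

lemma pv_step_pre (w : String) (pre suf : PySem.Dict String (List String)) (j : Int) (p : String) :
    ((pvRegStep w (pre, suf) j).1.contains p
        = (pre.contains p || (p == PySem.Str.slice w none (some j)))) ∧
    ((pvRegStep w (pre, suf) j).1.getD p []
        = pre.getD p [] ++ (if p = PySem.Str.slice w none (some j) then [w] else [])) := by
  unfold pvRegStep
  simp only
  by_cases hp : p = PySem.Str.slice w none (some j)
  · subst hp
    constructor
    · rw [PySem.Dict.contains_modify]
      simp
    · rw [PySem.Dict.getD_modify]
      split_ifs with h1 h2 <;>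
        simp_all [PySem.Dict.getD_of_not_contains]
  · have hb : (p == PySem.Str.slice w none (some j)) = false := by simp [hp]
    constructor
    · rw [PySem.Dict.contains_modify, hb]
      split_ifs with h1
      · simp
      · rw [PySem.Dict.contains_insert, hb]
        simp
    · rw [PySem.Dict.getD_modify]
      split_ifs <;> simp_all [PySem.Dict.getD_insert]
lemma pv_step_suf (w : String) (pre suf : PySem.Dict String (List String)) (j : Int) (s : String) :
    ((pvRegStep w (pre, suf) j).2.contains s
        = (suf.contains s || (s == PySem.Str.slice w (some (j - 1)) none))) ∧
    ((pvRegStep w (pre, suf) j).2.getD s []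
        = suf.getD s [] ++ (if s = PySem.Str.slice w (some (j - 1)) none then [w] else [])) := by
  unfold pvRegStep
  simp only
  by_cases hs : s = PySem.Str.slice w (some (j - 1)) none
  · subst hs
    constructor
    · rw [PySem.Dict.contains_modify]
      simp
    · rw [PySem.Dict.getD_modify]
      split_ifs with h1 h2 <;>
        simp_all [PySem.Dict.getD_of_not_contains]
  · have hb : (s == PySem.Str.slice w (some (j - 1)) none) = false := by simp [hs]
    constructor
    · rw [PySem.Dict.contains_modify, hb]
      split_ifs with h1
      · simp
      · rw [PySem.Dict.contains_insert, hb]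
        simp
    · rw [PySem.Dict.getD_modify]
      split_ifs <;> simp_all [PySem.Dict.getD_insert]
def pvRegPreB (j : Int) (p d : String) : Bool :=
  PySem.Str.startswith d p && decide (j ≤ (p.length : Int))
def pvRegSufB (j : Int) (s d : String) : Bool :=
  PySem.Str.endswith d s && decide (1 ≤ s.length) &&
    decide ((s.length : Int) + j ≤ (d.length : Int) + 1)

lemma pv_slice_pre (w : String) (j : Int) (h0 : 0 ≤ j) :
    (PySem.Str.slice w none (some j)).toList = w.toList.take j.toNat := by
  rw [PySem.Str.toList_slice]
  have h : (j.toNat : Int) = j := Int.toNat_of_nonneg h0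
  rw [← h]
  exact PySem.List.slice_to_natCast w.toList j.toNat

lemma pv_slice_suf (w : String) (j : Int) (h0 : 0 ≤ j - 1) :
    (PySem.Str.slice w (some (j - 1)) none).toList = w.toList.drop (j - 1).toNat := by
  rw [PySem.Str.toList_slice]
  have h : (((j - 1).toNat : Int)) = j - 1 := Int.toNat_of_nonneg h0
  rw [← h]
  exact PySem.List.slice_from_natCast w.toList (j - 1).toNat

lemma pv_prefix_char (w p : String) (j : Int) (h0 : 0 ≤ j) (hle : j ≤ (w.length : Int)) :
    p = PySem.Str.slice w none (some j) ↔
      (PySem.Str.startswith w p = true ∧ (p.length : Int) = j) := by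
  have hwl : w.toList.length = w.length := by simp
  have hpl : p.toList.length = p.length := by simp
  rw [← String.toList_inj, pv_slice_pre w j h0, PySem.Str.startswith_eq,
    PySem.Chars.startswith_iff]
  constructor
  · intro h
    refine ⟨h ▸ List.take_prefix _ _, ?_⟩
    have := congrArg List.length h
    rw [List.length_take] at this
    omega
  · rintro ⟨hpre, hlen⟩
    rw [List.prefix_iff_eq_take] at hpre
    rw [hpre]
    congr 1
    omega

lemma pv_suffix_char (w s : String) (j : Int) (h0 : 1 ≤ j) (hle : j ≤ (w.length : Int) + 1) :
    s = PySem.Str.slice w (some (j - 1)) none ↔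
      (PySem.Str.endswith w s = true ∧ (s.length : Int) = (w.length : Int) - j + 1) := by
  have hwl : w.toList.length = w.length := by simp
  have hsl : s.toList.length = s.length := by simp
  rw [← String.toList_inj, pv_slice_suf w j (by omega), PySem.Str.endswith_eq,
    PySem.Chars.endswith_iff]
  constructor
  · intro h
    refine ⟨h ▸ List.drop_suffix _ _, ?_⟩
    have := congrArg List.length h
    rw [List.length_drop] at this
    omega
  · rintro ⟨hsuf, hlen⟩
    rw [List.suffix_iff_eq_drop] at hsuf
    rw [hsuf]
    congr 1
    omega

lemma pv_merge_pre (w p : String) (j : Int) (h3 : 3 ≤ j) (hle : j ≤ (w.length : Int)) :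
    ((p == PySem.Str.slice w none (some j)) || pvRegPreB (j + 1) p w) = pvRegPreB j p w := by
  by_cases hp : p = PySem.Str.slice w none (some j)
  · have hc := (pv_prefix_char w p j (by omega) hle).1 hp
    have h2 : pvRegPreB j p w = true := by
      unfold pvRegPreB
      rw [hc.1, hc.2]
      simp
    rw [h2, hp]
    simp
  · have hb : (p == PySem.Str.slice w none (some j)) = false := by simp [hp]
    rw [hb, Bool.false_or]
    unfold pvRegPreB
    by_cases hsw : PySem.Str.startswith w p = true
    · have hne : (p.length : Int) ≠ j := fun h =>
        hp ((pv_prefix_char w p j (by omega) hle).2 ⟨hsw, h⟩)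
      rw [hsw]
      simp only [Bool.true_and]
      rw [decide_eq_decide]
      omega
    · rw [Bool.eq_false_iff.2 hsw]
      simp
lemma pv_merge_suf (w s : String) (j : Int) (h3 : 3 ≤ j) (hle : j ≤ (w.length : Int)) :
    ((s == PySem.Str.slice w (some (j - 1)) none) || pvRegSufB (j + 1) s w) = pvRegSufB j s w := by
  by_cases hs : s = PySem.Str.slice w (some (j - 1)) none
  · have hc := (pv_suffix_char w s j (by omega) (by omega)).1 hs
    have h2 : pvRegSufB j s w = true := by
      unfold pvRegSufB
      rw [hc.1, hc.2]
      simp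
      constructor
      · omega
      · omega
    rw [h2, hs]
    simp
  · have hb : (s == PySem.Str.slice w (some (j - 1)) none) = false := by simp [hs]
    rw [hb, Bool.false_or]
    unfold pvRegSufB
    by_cases hsw : PySem.Str.endswith w s = true
    · have hne : (s.length : Int) ≠ (w.length : Int) - j + 1 := fun h =>
        hs ((pv_suffix_char w s j (by omega) (by omega)).2 ⟨hsw, h⟩)
      rw [hsw]
      simp only [Bool.true_and]
      by_cases h1 : 1 ≤ s.length
      · simp only [h1, decide_true, Bool.true_and]
        rw [decide_eq_decide]
        omega
      · simp [h1]
    · rw [Bool.eq_false_iff.2 hsw]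
      simp
lemma pv_app_pre (w p : String) (j : Int) (h3 : 3 ≤ j) (hle : j ≤ (w.length : Int)) :
    (if p = PySem.Str.slice w none (some j) then [w] else [])
      ++ (if pvRegPreB (j + 1) p w then [w] else [])
    = (if pvRegPreB j p w then [w] else []) := by
  by_cases hp : p = PySem.Str.slice w none (some j)
  · have hc := (pv_prefix_char w p j (by omega) hle).1 hp
    have h1 : pvRegPreB (j + 1) p w = false := by
      unfold pvRegPreB
      rw [hc.1, hc.2]
      simp
    have h2 : pvRegPreB j p w = true := by
      unfold pvRegPreB
      rw [hc.1, hc.2]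
      simp
    rw [h1, h2]
    simp [hp]
  · have hb : (p == PySem.Str.slice w none (some j)) = false := by simp [hp]
    have hm := pv_merge_pre w p j h3 hle
    rw [hb, Bool.false_or] at hm
    rw [hm]
    simp [hp]

lemma pv_app_suf (w s : String) (j : Int) (h3 : 3 ≤ j) (hle : j ≤ (w.length : Int)) :
    (if s = PySem.Str.slice w (some (j - 1)) none then [w] else [])
      ++ (if pvRegSufB (j + 1) s w then [w] else [])
    = (if pvRegSufB j s w then [w] else []) := by
  by_cases hs : s = PySem.Str.slice w (some (j - 1)) none
  · have hc := (pv_suffix_char w s j (by omega) (by omega)).1 hs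
    have h1 : pvRegSufB (j + 1) s w = false := by
      unfold pvRegSufB
      rw [hc.1, hc.2]
      simp
      intro _
      omega
    have h2 : pvRegSufB j s w = true := by
      unfold pvRegSufB
      rw [hc.1, hc.2]
      simp
      constructor
      · omega
      · omega
    rw [h1, h2]
    simp [hs]
  · have hb : (s == PySem.Str.slice w (some (j - 1)) none) = false := by simp [hs]
    have hm := pv_merge_suf w s j h3 hle
    rw [hb, Bool.false_or] at hm
    rw [hm]
    simp [hs]

lemma pv_len_w (w : String) : PySem.Str.len w = (w.length : Int) := by
  rw [PySem.Str.len_eq]; simp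

lemma pv_inner_inv (w : String) (n : Nat) :
    ∀ (j : Int) (pre suf : PySem.Dict String (List String)), 3 ≤ j →
      ((PySem.Str.len w + 1) - j).toNat = n →
      (∀ p,
        (((PySem.List.pyRange j (PySem.Str.len w + 1)).foldl (pvRegStep w) (pre, suf)).1.contains p
            = (pre.contains p || pvRegPreB j p w)) ∧
        (((PySem.List.pyRange j (PySem.Str.len w + 1)).foldl (pvRegStep w) (pre, suf)).1.getD p []
            = pre.getD p [] ++ (if pvRegPreB j p w then [w] else []))) ∧
      (∀ s,
        (((PySem.List.pyRange j (PySem.Str.len w + 1)).foldl (pvRegStep w) (pre, suf)).2.contains s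
            = (suf.contains s || pvRegSufB j s w)) ∧
        (((PySem.List.pyRange j (PySem.Str.len w + 1)).foldl (pvRegStep w) (pre, suf)).2.getD s []
            = suf.getD s [] ++ (if pvRegSufB j s w then [w] else []))) := by
  induction n with
  | zero =>
    intro j pre suf h3 hfuel
    rw [pv_len_w] at hfuel
    have hnil : PySem.List.pyRange j (PySem.Str.len w + 1) = [] := by
      apply PySem.List.pyRange_one_eq_nil
      rw [pv_len_w]
      omega
    rw [hnil]
    simp only [List.foldl_nil]
    constructor
    · intro p
      have hfalse : pvRegPreB j p w = false := by
        unfold pvRegPreB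
        by_cases hsw : PySem.Str.startswith w p = true
        · have hpre : p.toList <+: w.toList := by
            rw [PySem.Str.startswith_eq, PySem.Chars.startswith_iff] at hsw
            exact hsw
          have hlen := hpre.length_le
          simp only [String.length_toList] at hlen
          rw [hsw]
          simp
          omega
        · rw [Bool.eq_false_iff.2 hsw]
          simp
      rw [hfalse]
      simp
    · intro s
      have hfalse : pvRegSufB j s w = false := by
        unfold pvRegSufB
        by_cases hsw : PySem.Str.endswith w s = true
        · have hsuf : s.toList <:+ w.toList := by
            rw [PySem.Str.endswith_eq, PySem.Chars.endswith_iff] at hsw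
            exact hsw
          have hlen := hsuf.length_le
          simp only [String.length_toList] at hlen
          rw [hsw]
          simp
          intro h1
          omega
        · rw [Bool.eq_false_iff.2 hsw]
          simp
      rw [hfalse]
      simp
  | succ n ih =>
    intro j pre suf h3 hfuel
    rw [pv_len_w] at hfuel
    have hlt : j < PySem.Str.len w + 1 := by rw [pv_len_w]; omega
    have hle : j ≤ (w.length : Int) := by omega
    rw [PySem.List.pyRange_one_cons hlt]
    simp only [List.foldl_cons]
    have ihs := ih (j + 1) (pvRegStep w (pre, suf) j).1 (pvRegStep w (pre, suf) j).2
      (by omega) (by rw [pv_len_w]; omega)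
    constructor
    · intro p
      have h1 := (ihs.1 p)
      rw [Prod.mk.eta] at h1
      have h2 := pv_step_pre w pre suf j p
      constructor
      · rw [h1.1, h2.1, Bool.or_assoc, pv_merge_pre w p j h3 hle]
      · rw [h1.2, h2.2, List.append_assoc, pv_app_pre w p j h3 hle]
    · intro s
      have h1 := (ihs.2 s)
      rw [Prod.mk.eta] at h1
      have h2 := pv_step_suf w pre suf j s
      constructor
      · rw [h1.1, h2.1, Bool.or_assoc, pv_merge_suf w s j h3 hle]
      · rw [h1.2, h2.2, List.append_assoc, pv_app_suf w s j h3 hle]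

lemma pv_build_inv (dict : List String) :
    ∀ (pre suf : PySem.Dict String (List String)),
      (∀ p,
        ((dict.foldl (fun ps word =>
            (PySem.List.pyRange 3 (PySem.Str.len word + 1)).foldl (pvRegStep word) ps)
            (pre, suf)).1.contains p = (pre.contains p || dict.any (pvRegPreB 3 p))) ∧
        ((dict.foldl (fun ps word =>
            (PySem.List.pyRange 3 (PySem.Str.len word + 1)).foldl (pvRegStep word) ps)
            (pre, suf)).1.getD p [] = pre.getD p [] ++ dict.filter (pvRegPreB 3 p))) ∧
      (∀ s,
        ((dict.foldl (fun ps word =>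
            (PySem.List.pyRange 3 (PySem.Str.len word + 1)).foldl (pvRegStep word) ps)
            (pre, suf)).2.contains s = (suf.contains s || dict.any (pvRegSufB 3 s))) ∧
        ((dict.foldl (fun ps word =>
            (PySem.List.pyRange 3 (PySem.Str.len word + 1)).foldl (pvRegStep word) ps)
            (pre, suf)).2.getD s [] = suf.getD s [] ++ dict.filter (pvRegSufB 3 s))) := by
  induction dict with
  | nil => intro pre suf; simp
  | cons w rest ih =>
    intro pre suf
    simp only [List.foldl_cons]
    have hinner := pv_inner_inv w ((PySem.Str.len w + 1 - 3).toNat) 3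
      pre suf (by omega) rfl
    have ihs := ih ((PySem.List.pyRange 3 (PySem.Str.len w + 1)).foldl (pvRegStep w) (pre, suf)).1
      ((PySem.List.pyRange 3 (PySem.Str.len w + 1)).foldl (pvRegStep w) (pre, suf)).2
    rw [Prod.mk.eta] at ihs
    constructor
    · intro p
      have h1 := ihs.1 p
      have h2 := hinner.1 p
      constructor
      · rw [h1.1, h2.1, Bool.or_assoc, List.any_cons]
      · rw [h1.2, h2.2, List.append_assoc, List.filter_cons]
        congr 1
        by_cases hc : pvRegPreB 3 p w = true <;> simp [hc]
    · intro s
      have h1 := ihs.2 s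
      have h2 := hinner.2 s
      constructor
      · rw [h1.1, h2.1, Bool.or_assoc, List.any_cons]
      · rw [h1.2, h2.2, List.append_assoc, List.filter_cons]
        congr 1
        by_cases hc : pvRegSufB 3 s w = true <;> simp [hc]
lemma pv_main (dictionary words : List String) :
    find_blends dictionary words = find_blends_alt dictionary words := by
  unfold find_blends find_blends_alt
  dsimp only
  apply PySem.List.foldl_congr_mem
  intro res w _
  have hbuild := pv_build_inv dictionary PySem.Dict.empty PySem.Dict.empty
  have hblends :
      (PySem.List.pyRange 3 (PySem.Str.len w)).foldl (fun blends i =>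
        if (dictionary.foldl
            (fun ps word => (PySem.List.pyRange 3 (PySem.Str.len word + 1)).foldl (pvRegStep word) ps)
            (PySem.Dict.empty, PySem.Dict.empty)).1.contains (PySem.Str.slice w none (some i)) &&
           (dictionary.foldl
            (fun ps word => (PySem.List.pyRange 3 (PySem.Str.len word + 1)).foldl (pvRegStep word) ps)
            (PySem.Dict.empty, PySem.Dict.empty)).2.contains (PySem.Str.slice w (some (i - 1)) none) then
          ((dictionary.foldl
            (fun ps word => (PySem.List.pyRange 3 (PySem.Str.len word + 1)).foldl (pvRegStep word) ps)
            (PySem.Dict.empty, PySem.Dict.empty)).1.getD (PySem.Str.slice w none (some i)) []).foldl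
            (fun blends pre_word =>
              ((dictionary.foldl
                (fun ps word => (PySem.List.pyRange 3 (PySem.Str.len word + 1)).foldl (pvRegStep word) ps)
                (PySem.Dict.empty, PySem.Dict.empty)).2.getD (PySem.Str.slice w (some (i - 1)) none) []).foldl
                (fun blends suf_word => PySem.Set.add blends (pre_word, suf_word)) blends) blends
        else blends) PySem.Set.empty
      = (PySem.List.pyRange 3 (PySem.Str.len w)).foldl (fun blends i =>
          (dictionary.filter (fun d => PySem.Str.startswith d (PySem.Str.slice w none (some i)))).foldl
            (fun blends p =>
              (dictionary.filter (fun d =>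
                decide (PySem.Str.len (PySem.Str.slice w (some (i - 1)) none) + 2 ≤ PySem.Str.len d) &&
                PySem.Str.endswith d (PySem.Str.slice w (some (i - 1)) none))).foldl
                (fun blends s => PySem.Set.add blends (p, s)) blends) blends) PySem.Set.empty := by
    apply PySem.List.foldl_congr_mem
    intro blends i hi
    rw [PySem.List.mem_pyRange_one, pv_len_w] at hi
    obtain ⟨h3, hlt⟩ := hi
    have hptake := pv_slice_pre w i (by omega)
    have hplen : (((PySem.Str.slice w none (some i)).length : Int)) = i := by
      have h2 := congrArg List.length hptake
      simp only [String.length_toList, List.length_take] at h2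
      omega
    have hsdrop := pv_slice_suf w i (by omega)
    have hslen : (((PySem.Str.slice w (some (i - 1)) none).length : Int)) = (w.length : Int) - i + 1 := by
      have h2 := congrArg List.length hsdrop
      simp only [String.length_toList, List.length_drop] at h2
      omega
    have hpredP : ∀ d, pvRegPreB 3 (PySem.Str.slice w none (some i)) d
        = PySem.Str.startswith d (PySem.Str.slice w none (some i)) := by
      intro d
      unfold pvRegPreB
      have h1 : decide ((3:Int) ≤ ((PySem.Str.slice w none (some i)).length : Int)) = true := by
        rw [decide_eq_true_eq]; omega
      rw [h1, Bool.and_true]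
    have hpredS : ∀ d, pvRegSufB 3 (PySem.Str.slice w (some (i - 1)) none) d
        = (decide (PySem.Str.len (PySem.Str.slice w (some (i - 1)) none) + 2 ≤ PySem.Str.len d) &&
           PySem.Str.endswith d (PySem.Str.slice w (some (i - 1)) none)) := by
      intro d
      unfold pvRegSufB
      rw [pv_len_w d, pv_len_w (PySem.Str.slice w (some (i - 1)) none)]
      have h1 : decide (1 ≤ (PySem.Str.slice w (some (i - 1)) none).length) = true := by
        rw [decide_eq_true_eq]; omega
      have h2 : decide ((((PySem.Str.slice w (some (i - 1)) none).length : Int)) + 3 ≤ (d.length : Int) + 1)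
          = decide ((((PySem.Str.slice w (some (i - 1)) none).length : Int)) + 2 ≤ (d.length : Int)) := by
        rw [decide_eq_decide]; omega
      rw [h1, Bool.and_true, h2, Bool.and_comm]
    rw [(hbuild.1 (PySem.Str.slice w none (some i))).1,
        (hbuild.1 (PySem.Str.slice w none (some i))).2,
        (hbuild.2 (PySem.Str.slice w (some (i - 1)) none)).1,
        (hbuild.2 (PySem.Str.slice w (some (i - 1)) none)).2]
    simp only [PySem.Dict.contains_empty, PySem.Dict.getD_empty, Bool.false_or, List.nil_append]
    rw [List.filter_congr (fun d _ => hpredP d), List.filter_congr (fun d _ => hpredS d),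
        PySem.List.any_congr_mem (fun d _ => hpredP d),
        PySem.List.any_congr_mem (fun d _ => hpredS d)]
    by_cases haP : dictionary.any (fun d => PySem.Str.startswith d (PySem.Str.slice w none (some i))) = true
    · by_cases haS : dictionary.any (fun d =>
          decide (PySem.Str.len (PySem.Str.slice w (some (i - 1)) none) + 2 ≤ PySem.Str.len d) &&
          PySem.Str.endswith d (PySem.Str.slice w (some (i - 1)) none)) = true
      · rw [haP, haS]
        simp only [Bool.and_self, if_true]
      · have hS := Bool.eq_false_iff.2 haS
        have hfS : dictionary.filter (fun d =>
            decide (PySem.Str.len (PySem.Str.slice w (some (i - 1)) none) + 2 ≤ PySem.Str.len d) &&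
            PySem.Str.endswith d (PySem.Str.slice w (some (i - 1)) none)) = [] := by
          rw [List.filter_eq_nil_iff]
          intro d hd
          have := List.any_eq_false.1 hS d hd
          simpa using this
        rw [hfS, hS]
        simp only [Bool.and_false, List.foldl_nil]
        rw [PySem.List.foldl_ignore]
        simp
    · have hP := Bool.eq_false_iff.2 haP
      have hfP : dictionary.filter (fun d =>
          PySem.Str.startswith d (PySem.Str.slice w none (some i))) = [] := by
        rw [List.filter_eq_nil_iff]
        intro d hd
        have := List.any_eq_false.1 hP d hd
        simpa using this
      rw [hfP, hP]
      simp only [Bool.false_and, List.foldl_nil]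
      simp
  rw [hblends]
  generalize (PySem.List.pyRange 3 (PySem.Str.len w)).foldl (fun blends i =>
          (dictionary.filter (fun d => PySem.Str.startswith d (PySem.Str.slice w none (some i)))).foldl
            (fun blends p =>
              (dictionary.filter (fun d =>
                decide (PySem.Str.len (PySem.Str.slice w (some (i - 1)) none) + 2 ≤ PySem.Str.len d) &&
                PySem.Str.endswith d (PySem.Str.slice w (some (i - 1)) none))).foldl
                (fun blends s => PySem.Set.add blends (p, s)) blends) blends) PySem.Set.empty = b
  match b with
  | [] => simp [PySem.Set.len]
  | [p] => simp [PySem.Set.len, PySem.List.pyGet?, PySem.List.pyIdx?]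
  | p :: q :: t =>
    have h2 : PySem.Set.len (p :: q :: t) > 1 := by
      simp [PySem.Set.len]
    simp

-- ===== VERDICT (by name: the statement is the Claim_ definition above) =====
theorem find_blends_spec : Claim_equal_find_blends := by
  unfold Claim_equal_find_blends Spec_find_blends
  intro dictionary words _
  exact pv_main dictionary words
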